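-- pv_equiv track=rewrite | github.com/gitshahnawaz/leetcode | 1324. Print Words Vertically.py | printVertically
-- ===== SOURCE A (Python) =====
-- from typing import List
--
-- def printVertically(s: str) -> List[str]:
--     s = list(map(str, s.split()))
--
--     m = max([len(st) for st in s])
--     n = len(s)
--
--     res = ["" for _ in range(m)]
--
--     for i in range(len(s)):
--         for j in range(m):
--             if len(s[i]) <= j:
--                 res[j] += " "
--             else:
--                 res[j] += s[i][j]
--
--
--     return [r.rstrip() for r in res]
-- ===== SOURCE B (Python) =====
-- from typing import List
--
-- def printVertically(s: str) -> List[str]: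
--     words = [list(reversed(w)) for w in s.split()]
--     res = []
--     while any(words):
--         col = ''.join(w.pop() if w else ' ' for w in words)
--         res.append(col.rstrip())
--     return res
-- ===== Notes on version B (the rewrite author's own statement) =====
-- stated objective: idiomatic
-- what changed: A fills m column buffers with an index-based double loop (res[j] += s[i][j] or ' '); B transposes the word list directly: it keeps each word reversed and each round pops one character (or the ' ' fill) off every word to emit one rstripped column, with no index arithmetic or length test.
-- outside the precondition, e.g. on printVertically(' '): A raises ValueError, B returns []
-- crash fix: On whitespace-only or empty strings s.split() is empty and A raises ValueError in max([]); B naturally returns []. — e.g. on printVertically(" "): A raises ValueError, B returns []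
import Mathlib
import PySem

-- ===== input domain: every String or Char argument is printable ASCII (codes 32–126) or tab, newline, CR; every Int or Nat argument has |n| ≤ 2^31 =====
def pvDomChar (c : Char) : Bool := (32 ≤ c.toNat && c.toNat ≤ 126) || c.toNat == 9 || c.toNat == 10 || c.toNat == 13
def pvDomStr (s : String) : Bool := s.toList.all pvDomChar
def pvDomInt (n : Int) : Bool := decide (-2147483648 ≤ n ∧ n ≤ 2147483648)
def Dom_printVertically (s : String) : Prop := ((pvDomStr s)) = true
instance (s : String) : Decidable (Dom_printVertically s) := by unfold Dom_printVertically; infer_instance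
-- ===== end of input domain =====

-- B replaces A's index-based column-filling double loop (res[j] += ...) by a transpose that consumes
-- the reversed words column by column, popping one character (or the fill ' ') per word per round
-- (idiomatic zip_longest-style decomposition); on whitespace-only input A raises ValueError (excluded
-- by Pre_) while B returns [].


-- ===== PORT A =====
-- inner loop 'for j in range(m): res[j] += …' (strings handled as List Char per the PySem convention)
def pvAInner (w : List Char) (m : Nat) (res : List (List Char)) : List (List Char) :=
  (List.range m).foldl (fun res j =>
    if w.length ≤ j then res.set j (res.getD j [] ++ [' '])
    else res.set j (res.getD j [] ++ [w.getD j ' '])) res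

def printVertically (s : String) : List String :=
  let sw := PySem.Chars.split₀ s.toList
  -- max([...]) raises ValueError on an empty list: that input is excluded by Pre_, .getD 0 is arbitrary there
  let m := (PySem.List.max? (sw.map List.length) (fun x => x)).getD 0
  let res0 : List (List Char) := (List.range m).map (fun _ => ([] : List Char))
  let res := sw.foldl (fun res w => pvAInner w m res) res0
  res.map (fun r => String.ofList (PySem.Chars.rstrip r))

-- ===== PORT B =====
-- termination helpers for the 'while any(words)' loop: popping the head of every nonempty word shrinks the total size
theorem pvPopSumLe (ws : List (List Char)) :
    ((ws.map List.dropLast).map List.length).sum ≤ (ws.map List.length).sum := by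
  induction ws with
  | nil => simp
  | cons w t ih =>
    simp only [List.map_cons, List.sum_cons, List.length_dropLast]
    omega

theorem pvPopSum (ws : List (List Char)) (h : ws.any (fun w => !w.isEmpty) = true) :
    ((ws.map List.dropLast).map List.length).sum < (ws.map List.length).sum := by
  induction ws with
  | nil => simp at h
  | cons w t ih =>
    cases w with
    | nil =>
      simp only [List.any_cons, List.isEmpty_nil, Bool.not_true, Bool.false_or] at h
      simpa using ih h
    | cons c cs =>
      have := pvPopSumLe t
      have : ((c :: cs).dropLast).length = cs.length := by simp [List.length_dropLast]
      simp only [List.map_cons, List.sum_cons, List.length_cons] at *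
      omega

-- the while loop: each round pops the last character of every reversed word (the word's next front
-- character) or uses the fill ' '
def pvBCols (ws : List (List Char)) (acc : List (List Char)) : List (List Char) :=
  if h : ws.any (fun w => !w.isEmpty) = true then
    pvBCols (ws.map List.dropLast) (acc ++ [PySem.Chars.rstrip (ws.map (fun w => w.getLastD ' '))])
  else acc
termination_by (ws.map List.length).sum
decreasing_by simpa using pvPopSum ws h

def printVertically_alt (s : String) : List String :=
  (pvBCols ((PySem.Chars.split₀ s.toList).map List.reverse) []).map String.ofList

-- ===== PRECONDITION & SPEC =====
-- Pre_ excludes whitespace-only (incl. empty) strings, i.e. s.split() == []: there A raises ValueError in max([]).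
def Pre_printVertically (s : String) : Prop := PySem.Chars.split₀ s.toList ≠ []
instance (s : String) : Decidable (Pre_printVertically s) := by unfold Pre_printVertically; infer_instance
def pvWitness_printVertically : String := "TO BE OR NOT"

-- On whitespace-only (or empty) strings A raises ValueError (max() of an empty sequence); B returns [].
def Raises_printVertically (s : String) : Prop := PySem.Chars.split₀ s.toList = []
instance (s : String) : Decidable (Raises_printVertically s) := by unfold Raises_printVertically; infer_instance
def pvRaiseWitness_printVertically : String := " "
def pvRaiseWitnessOut_printVertically : List String := []

def Spec_printVertically (s : String) (out : List String) : Prop := out = printVertically_alt s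
instance (s : String) (out : List String) : Decidable (Spec_printVertically s out) := by unfold Spec_printVertically; infer_instance

-- ===== CLAIM (what is proved, stated in full; the proofs are below) =====
def Claim_equal_printVertically : Prop := ∀ (s : String), Dom_printVertically s → Pre_printVertically s → Spec_printVertically s (printVertically s)
def Claim_raises_printVertically : Prop := (∀ (s : String), Dom_printVertically s → Raises_printVertically s → ¬ Pre_printVertically s) ∧ (Dom_printVertically (pvRaiseWitness_printVertically) ∧ Raises_printVertically (pvRaiseWitness_printVertically) ∧ printVertically_alt (pvRaiseWitness_printVertically) = pvRaiseWitnessOut_printVertically)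

-- ===== LEMMAS AND PROOFS =====

-- column j over the word list, ' ' as fill: the common description of both programs' output
def pvColD (ws : List (List Char)) (j : Nat) : List Char := ws.map (fun w => w.getD j ' ')

-- largest word length
def pvMaxLen (ws : List (List Char)) : Nat := (ws.map List.length).foldr max 0

theorem pvGetDAppend {α : Type} (k : Nat) (A B : List α) (x d : α) (h : A.length = k) :
    (A ++ x :: B).getD k d = x := by subst h; simp [List.getD]

theorem pvSetAppend {α : Type} (k : Nat) (A B : List α) (x y : α) (h : A.length = k) :
    (A ++ x :: B).set k y = A ++ y :: B := by
  subst h; rw [List.set_append_right _ _ (le_refl _)]; simp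

theorem pvInnerRange (w : List Char) (k : Nat) (res : List (List Char)) (hk : k ≤ res.length) :
    (List.range k).foldl (fun res j => res.set j (res.getD j [] ++ [w.getD j ' '])) res
      = (List.range k).map (fun j => res.getD j [] ++ [w.getD j ' ']) ++ res.drop k := by
  induction k with
  | zero => simp
  | succ k ih =>
    rw [List.range_succ, List.foldl_append, List.map_append, ih (by omega)]
    simp only [List.foldl_cons, List.foldl_nil, List.map_cons, List.map_nil]
    have hlt : k < res.length := by omega
    have hlen : ((List.range k).map (fun j => res.getD j [] ++ [w.getD j ' '])).length = k := by simp
    have hdrop : res.drop k = res[k] :: res.drop (k+1) := List.drop_eq_getElem_cons hlt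
    rw [hdrop, pvGetDAppend k _ _ _ _ hlen, pvSetAppend k _ _ _ _ hlen]
    have : res.getD k [] = res[k] := List.getD_eq_getElem res [] hlt
    rw [this]
    simp

theorem pvInnerEq (w : List Char) (m : Nat) (res : List (List Char)) (hm : res.length = m) :
    pvAInner w m res = (List.range m).map (fun j => res.getD j [] ++ [w.getD j ' ']) := by
  unfold pvAInner
  rw [PySem.List.foldl_congr_mem _ _ (fun res j => res.set j (res.getD j [] ++ [w.getD j ' '])) _
      (by
        intro acc j _
        simp only []
        split_ifs with h
        · rw [List.getD_eq_default _ _ h]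
        · rfl)]
  rw [pvInnerRange w m res (by omega)]
  simp [hm]

theorem pvOuterEq (m : Nat) (ws : List (List Char)) (f : Nat → List Char) :
    ws.foldl (fun res w => pvAInner w m res) ((List.range m).map f)
      = (List.range m).map (fun j => f j ++ pvColD ws j) := by
  induction ws generalizing f with
  | nil => simp [pvColD]
  | cons w t ih =>
    simp only [List.foldl_cons]
    rw [pvInnerEq w m _ (by simp)]
    have : ((List.range m).map (fun j => ((List.range m).map f).getD j [] ++ [w.getD j ' ']))
         = (List.range m).map (fun j => f j ++ [w.getD j ' ']) := by
      apply List.map_congr_left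
      intro j hj
      rw [PySem.List.getD_map_range f m j [] (List.mem_range.mp hj)]
    rw [this, ih]
    apply List.map_congr_left
    intro j _
    simp [pvColD]

theorem pvMaxLenTail (ws : List (List Char)) :
    pvMaxLen (ws.map List.tail) = pvMaxLen ws - 1 := by
  induction ws with
  | nil => simp [pvMaxLen]
  | cons w t ih =>
    simp only [pvMaxLen, List.map_cons, List.foldr_cons] at *
    have := List.length_tail (l := w)
    omega

theorem pvMaxLenZero (ws : List (List Char)) :
    pvMaxLen ws = 0 ↔ ws.any (fun w => !w.isEmpty) = false := by
  induction ws with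
  | nil => simp [pvMaxLen]
  | cons w t ih =>
    simp only [pvMaxLen, List.map_cons, List.foldr_cons, List.any_cons] at *
    constructor
    · intro h
      have hw : w.length = 0 := by omega
      have : w.isEmpty = true := by simpa [List.isEmpty_iff, List.length_eq_zero_iff] using hw
      simp [this, ih.mp (by omega)]
    · intro h
      simp only [Bool.or_eq_false_iff, Bool.not_eq_false'] at h
      have hw : w.length = 0 := by simpa [List.isEmpty_iff, List.length_eq_zero_iff] using h.1
      have := ih.mpr h.2
      omega

theorem pvRevLastD (w : List Char) : w.reverse.getLastD ' ' = w.getD 0 ' ' := by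
  cases w with
  | nil => rfl
  | cons c cs => simp [List.getLastD_eq_getLast?, List.getLast?_reverse, List.getD]

theorem pvRevDrop (w : List Char) : w.reverse.dropLast = w.tail.reverse := by
  cases w <;> simp

theorem pvColDTail (ws : List (List Char)) (j : Nat) :
    pvColD (ws.map List.tail) j = pvColD ws (j+1) := by
  simp only [pvColD, List.map_map]
  apply List.map_congr_left
  intro w _
  cases w <;> simp [List.getD]

theorem pvBColsEq (n : Nat) : ∀ (ws : List (List Char)) (acc : List (List Char)), pvMaxLen ws = n →
    pvBCols (ws.map List.reverse) acc
      = acc ++ (List.range n).map (fun j => PySem.Chars.rstrip (pvColD ws j)) := by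
  induction n with
  | zero =>
    intro ws acc h
    rw [pvBCols]
    have : (ws.map List.reverse).any (fun w => !w.isEmpty) = false := by
      have := (pvMaxLenZero ws).mp h
      simpa [List.any_map, Function.comp] using this
    simp [this]
  | succ n ih =>
    intro ws acc h
    have hany : (ws.map List.reverse).any (fun w => !w.isEmpty) = true := by
      by_contra hc
      have hc' : ws.any (fun w => !w.isEmpty) = false := by
        simpa [List.any_map, Function.comp] using (Bool.not_eq_true _).mp hc
      have := (pvMaxLenZero ws).mpr hc'
      omega
    rw [pvBCols]
    simp only [hany, dite_true]
    have hstep : (ws.map List.reverse).map List.dropLast = (ws.map List.tail).map List.reverse := by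
      simp only [List.map_map]
      exact List.map_congr_left (fun w _ => pvRevDrop w)
    rw [hstep, ih (ws.map List.tail) _ (by rw [pvMaxLenTail, h]; omega)]
    rw [List.range_succ_eq_map]
    simp only [List.map_cons, List.map_map, List.append_assoc]
    congr 1
    · simp only [List.singleton_append]
      congr 1
      · congr 1
        simp only [pvColD]
        apply List.map_congr_left
        intro w _
        exact pvRevLastD w
      · apply List.map_congr_left
        intro j _
        simp only [Function.comp]
        rw [pvColDTail]

theorem pvFoldlMax (xs : List Nat) : ∀ a, xs.foldl max a = max a (xs.foldr max 0) := by
  induction xs with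
  | nil => intro a; simp
  | cons x t ih => intro a; simp only [List.foldl_cons, List.foldr_cons, ih]; omega

theorem pvMEq (w : List Char) (t : List (List Char)) :
    (PySem.List.max? ((w :: t).map List.length) (fun x => x)).getD 0 = pvMaxLen (w :: t) := by
  simp only [List.map_cons, PySem.List.max?_id_cons, Option.getD_some, pvMaxLen, List.foldr_cons]
  exact pvFoldlMax _ _

theorem pvMain (s : String) (hpre : PySem.Chars.split₀ s.toList ≠ []) :
    printVertically s = printVertically_alt s := by
  unfold printVertically printVertically_alt
  cases hsw : PySem.Chars.split₀ s.toList with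
  | nil => exact absurd hsw hpre
  | cons w t =>
    simp only
    rw [pvMEq w t, pvOuterEq (pvMaxLen (w :: t)) (w :: t) (fun _ => []),
        pvBColsEq (pvMaxLen (w :: t)) (w :: t) [] rfl]
    simp [List.map_map, Function.comp]

-- ===== VERDICT (by name: the statement is the Claim_ definition above) =====
theorem printVertically_spec : Claim_equal_printVertically := by
  intro s _ hpre
  unfold Spec_printVertically
  exact pvMain s hpre

theorem printVertically_raises : Claim_raises_printVertically := by
  unfold Claim_raises_printVertically
  refine ⟨fun s _ h hp => hp h, by decide, by decide, ?_⟩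
  unfold printVertically_alt pvRaiseWitness_printVertically pvRaiseWitnessOut_printVertically
  rw [show PySem.Chars.split₀ (" " : String).toList = [] from by decide, pvBCols]
  simp

-- self-check: the concrete raise-witness value recorded above is the one the theorem certifies
theorem printVertically_raises_ok : printVertically_alt pvRaiseWitness_printVertically = [] :=
  printVertically_raises.2.2.2
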